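-- pv_equiv track=rewrite | github.com/tkhangg0910/ViSL-Text-To-Signed-Translation | visl_pipeline.py | gloss_to_token_list
-- ===== SOURCE A (Python) =====
-- def gloss_to_token_list(gloss: dict) -> list[str]:
--     """Flatten gloss dict theo thứ tự TIME → S → O → PLACE → V thành list token."""
--     order = ["TIME", "S", "O", "Q", "PLACE", "V"]
--     tokens = []
--     for key in order:
--         if key in gloss:
--             tokens.extend(gloss[key])
--     for key, values in gloss.items():
--         if key not in order:
--             tokens.extend(values)
--     return tokens
-- ===== SOURCE B (Python) =====
-- def gloss_to_token_list(gloss: dict) -> list[str]: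
--     """Flatten gloss dict theo thứ tự TIME → S → O → PLACE → V thành list token."""
--     t, s, o, q, p, v, rest = [], [], [], [], [], [], []
--     for key, values in gloss.items():
--         if key == "TIME":
--             t += values
--         elif key == "S":
--             s += values
--         elif key == "O":
--             o += values
--         elif key == "Q":
--             q += values
--         elif key == "PLACE":
--             p += values
--         elif key == "V":
--             v += values
--         else:
--             rest += values
--     return t + s + o + q + p + v + rest
-- ===== Notes on version B (the rewrite author's own statement) =====
-- stated objective: alternative
-- what changed: Replaces A's two passes (a fixed-order loop of membership-test-plus-lookup over the order list, then a second filtered pass over the dict) by one single pass over the dict that dispatches each entry into one of seven explicit accumulators, concatenated at the end.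
import Mathlib
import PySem

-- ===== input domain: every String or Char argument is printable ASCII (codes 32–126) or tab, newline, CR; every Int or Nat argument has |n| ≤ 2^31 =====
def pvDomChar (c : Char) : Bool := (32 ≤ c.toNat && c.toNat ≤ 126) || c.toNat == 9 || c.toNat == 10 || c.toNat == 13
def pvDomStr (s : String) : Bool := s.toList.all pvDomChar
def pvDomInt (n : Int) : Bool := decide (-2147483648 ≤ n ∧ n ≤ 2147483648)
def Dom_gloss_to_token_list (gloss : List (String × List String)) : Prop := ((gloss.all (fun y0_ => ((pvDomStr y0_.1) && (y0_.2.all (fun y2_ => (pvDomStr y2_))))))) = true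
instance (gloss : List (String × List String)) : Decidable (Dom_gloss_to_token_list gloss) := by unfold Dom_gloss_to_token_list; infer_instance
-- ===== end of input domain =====

-- B replaces A's two passes (fixed-order lookup loop + filtered remainder loop) by one
-- single pass over the dict that dispatches each entry into seven explicit accumulators;
-- same cost, alternative structure. Equality of the RETURN values is what is proved.

-- ===== PORT A =====
def pvOrder : List String := ["TIME", "S", "O", "Q", "PLACE", "V"]

-- body of A's first loop: 'if key in gloss: tokens.extend(gloss[key])'
-- ('key in gloss' = key membership; 'gloss[key]' = first-match lookup, dict convention)
def pvAStep1 (gloss : List (String × List String)) (acc : List String) (key : String) : List String :=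
  if (gloss.map Prod.fst).contains key then acc ++ ((List.lookup key gloss).getD []) else acc

-- body of A's second loop: 'if key not in order: tokens.extend(values)'
def pvAStep2 (acc : List String) (kv : String × List String) : List String :=
  if pvOrder.contains kv.1 then acc else acc ++ kv.2

-- literal port of A: loop over the fixed order list, then a filtered pass over the items.
def gloss_to_token_list (gloss : List (String × List String)) : List String :=
  let tokens := pvOrder.foldl (pvAStep1 gloss) []
  gloss.foldl pvAStep2 tokens

-- ===== PORT B =====
-- body of B's single loop: dispatch one (key, values) pair into the matching accumulator
def pvBStep
    (st : List String × List String × List String × List String × List String × List String × List String)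
    (kv : String × List String) :
    List String × List String × List String × List String × List String × List String × List String :=
  let (t, s, o, q, p, v, rest) := st
  if kv.1 = "TIME" then (t ++ kv.2, s, o, q, p, v, rest)
  else if kv.1 = "S" then (t, s ++ kv.2, o, q, p, v, rest)
  else if kv.1 = "O" then (t, s, o ++ kv.2, q, p, v, rest)
  else if kv.1 = "Q" then (t, s, o, q ++ kv.2, p, v, rest)
  else if kv.1 = "PLACE" then (t, s, o, q, p ++ kv.2, v, rest)
  else if kv.1 = "V" then (t, s, o, q, p, v ++ kv.2, rest)
  else (t, s, o, q, p, v, rest ++ kv.2)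

-- literal port of B: one fold over the items with seven accumulators, concatenated at the end.
def gloss_to_token_list_alt (gloss : List (String × List String)) : List String :=
  let st := gloss.foldl pvBStep ([], [], [], [], [], [], [])
  st.1 ++ st.2.1 ++ st.2.2.1 ++ st.2.2.2.1 ++ st.2.2.2.2.1 ++ st.2.2.2.2.2.1 ++ st.2.2.2.2.2.2

-- ===== PRECONDITION & SPEC =====
-- Pre_ requires the association list to have distinct keys: a Python dict cannot contain
-- duplicate keys, so duplicate-key lists do not correspond to any input A is ever given.
def Pre_gloss_to_token_list (gloss : List (String × List String)) : Prop :=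
  (gloss.map Prod.fst).Nodup
instance (gloss : List (String × List String)) : Decidable (Pre_gloss_to_token_list gloss) := by
  unfold Pre_gloss_to_token_list; infer_instance

def pvWitness_gloss_to_token_list : (List (String × List String)) :=
  [("S", ["hello", "you"]), ("X", ["hm"]), ("TIME", ["now"])]

def Spec_gloss_to_token_list (gloss : List (String × List String)) (out : List String) : Prop := out = gloss_to_token_list_alt gloss
instance (gloss : List (String × List String)) (out : List String) : Decidable (Spec_gloss_to_token_list gloss out) := by unfold Spec_gloss_to_token_list; infer_instance

-- ===== CLAIM (what is proved, stated in full; the proofs are below) =====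
def Claim_equal_gloss_to_token_list : Prop := ∀ (gloss : List (String × List String)), Dom_gloss_to_token_list gloss → Pre_gloss_to_token_list gloss → Spec_gloss_to_token_list gloss (gloss_to_token_list gloss)

-- ===== LEMMAS AND PROOFS =====

-- concatenation of all values stored under key k, in list order
def pvAllVals (k : String) (g : List (String × List String)) : List String :=
  ((g.filter (fun kv => kv.1 == k)).map Prod.snd).flatten

-- concatenation of all values whose key is outside the order list
def pvRestVals (g : List (String × List String)) : List String :=
  ((g.filter (fun kv => !(pvOrder.contains kv.1))).map Prod.snd).flatten

theorem pvAllVals_cons_ne (k : String) (hd : String × List String)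
    (tl : List (String × List String)) (h : ¬ hd.1 = k) :
    pvAllVals k (hd :: tl) = pvAllVals k tl := by
  have hb : (hd.1 == k) = false := beq_eq_false_iff_ne.mpr h
  simp [pvAllVals, List.filter_cons, hb]

theorem pvAllVals_cons_eq (k : String) (hd : String × List String)
    (tl : List (String × List String)) (h : hd.1 = k) :
    pvAllVals k (hd :: tl) = hd.2 ++ pvAllVals k tl := by
  have hb : (hd.1 == k) = true := beq_iff_eq.mpr h
  simp [pvAllVals, List.filter_cons, hb]

theorem pvAllVals_of_not_mem (k : String) (g : List (String × List String))
    (h : k ∉ g.map Prod.fst) : pvAllVals k g = [] := by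
  induction g with
  | nil => rfl
  | cons hd tl ih =>
    simp only [List.map_cons, List.mem_cons, not_or] at h
    rw [pvAllVals_cons_ne k hd tl (fun e => h.1 e.symm)]
    exact ih h.2

theorem lookup_eq_allVals (g : List (String × List String)) (k : String)
    (hnd : (g.map Prod.fst).Nodup) :
    (if (g.map Prod.fst).contains k then ((List.lookup k g).getD []) else []) = pvAllVals k g := by
  induction g with
  | nil => rfl
  | cons hd tl ih =>
    simp only [List.map_cons, List.nodup_cons] at hnd
    by_cases hk : hd.1 = k
    · have h0 : pvAllVals k tl = [] := pvAllVals_of_not_mem k tl (hk ▸ hnd.1)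
      have hb : (k == hd.1) = true := beq_iff_eq.mpr hk.symm
      rw [pvAllVals_cons_eq k hd tl hk, h0]
      simp [List.lookup, hb, List.contains_cons]
    · have hb : (k == hd.1) = false := beq_eq_false_iff_ne.mpr (fun e => hk e.symm)
      rw [pvAllVals_cons_ne k hd tl hk, List.map_cons]
      have e1 : (hd.1 :: tl.map Prod.fst).contains k = (tl.map Prod.fst).contains k := by
        simp [List.contains_cons, hb]
      have e2 : List.lookup k (hd :: tl) = List.lookup k tl := by
        simp [List.lookup, hb]
      rw [e1, e2]
      exact ih hnd.2

theorem aStep1_eq (g : List (String × List String)) (hnd : (g.map Prod.fst).Nodup)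
    (acc : List String) (k : String) :
    pvAStep1 g acc k = acc ++ pvAllVals k g := by
  rw [← lookup_eq_allVals g k hnd]
  unfold pvAStep1
  by_cases h : (g.map Prod.fst).contains k
  · rw [if_pos h, if_pos h]
  · rw [if_neg h, if_neg h, List.append_nil]

theorem second_pass_eq (g : List (String × List String)) (init : List String) :
    g.foldl pvAStep2 init = init ++ pvRestVals g := by
  induction g generalizing init with
  | nil => simp [pvRestVals]
  | cons hd tl ih =>
    by_cases h : pvOrder.contains hd.1
    · have hm : hd.1 ∈ pvOrder := by simpa using h
      simp only [List.foldl, pvAStep2, h, if_pos]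
      rw [ih]
      simp [pvRestVals, List.filter_cons, hm]
    · have hm : hd.1 ∉ pvOrder := by simpa using h
      simp only [List.foldl, pvAStep2, h, if_neg, Bool.false_eq_true, not_false_iff]
      rw [ih]
      simp [pvRestVals, List.filter_cons, hm, List.append_assoc]

theorem alt_fold_eq (g : List (String × List String))
    (t s o q p v r : List String) :
    g.foldl pvBStep (t, s, o, q, p, v, r)
      = (t ++ pvAllVals "TIME" g, s ++ pvAllVals "S" g, o ++ pvAllVals "O" g,
         q ++ pvAllVals "Q" g, p ++ pvAllVals "PLACE" g, v ++ pvAllVals "V" g,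
         r ++ pvRestVals g) := by
  induction g generalizing t s o q p v r with
  | nil => simp [pvAllVals, pvRestVals]
  | cons hd tl ih =>
    simp only [List.foldl]
    by_cases h1 : hd.1 = "TIME"
    · simp [pvBStep, h1, ih, pvAllVals, pvRestVals, pvOrder, List.filter_cons, List.append_assoc]
    · by_cases h2 : hd.1 = "S"
      · simp [pvBStep, h1, h2, ih, pvAllVals, pvRestVals, pvOrder, List.filter_cons, List.append_assoc]
      · by_cases h3 : hd.1 = "O"
        · simp [pvBStep, h1, h2, h3, ih, pvAllVals, pvRestVals, pvOrder, List.filter_cons, List.append_assoc]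
        · by_cases h4 : hd.1 = "Q"
          · simp [pvBStep, h1, h2, h3, h4, ih, pvAllVals, pvRestVals, pvOrder, List.filter_cons, List.append_assoc]
          · by_cases h5 : hd.1 = "PLACE"
            · simp [pvBStep, h1, h2, h3, h4, h5, ih, pvAllVals, pvRestVals, pvOrder, List.filter_cons, List.append_assoc]
            · by_cases h6 : hd.1 = "V"
              · simp [pvBStep, h1, h2, h3, h4, h5, h6, ih, pvAllVals, pvRestVals, pvOrder, List.filter_cons, List.append_assoc]
              · have hm : hd.1 ∉ pvOrder := by simp [pvOrder, h1, h2, h3, h4, h5, h6]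
                simp [pvBStep, h1, h2, h3, h4, h5, h6, ih, pvAllVals, pvRestVals,
                      pvOrder, List.filter_cons, hm, List.append_assoc]

-- ===== VERDICT (by name: the statement is the Claim_ definition above) =====
theorem gloss_to_token_list_spec : Claim_equal_gloss_to_token_list := by
  intro gloss _ hpre
  unfold Spec_gloss_to_token_list gloss_to_token_list gloss_to_token_list_alt
  have hstep := aStep1_eq gloss hpre
  rw [alt_fold_eq, second_pass_eq]
  simp only [pvOrder, List.foldl, hstep, List.nil_append, List.append_assoc]
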